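-- pv_equiv track=rewrite | github.com/qifanyyy/JupyterNotebook | new_algs/Sequence algorithms/Selection+algorithm/kernel_based.py | merge_ix_list
-- ===== SOURCE A (Python) =====
-- def merge_ix_list(ix_list):
--     L = []
--     seen = set([])
--
--     for X in ix_list:
--         if X[0] in seen:
--             continue
--         seen.add(X[0])
--         L.append(X)
--
--     betw = [X[1] for X in sorted(L, key=lambda X: X[0])]
--
--     o = []
--     for b in betw:
--         o.extend(b)
--     return o
-- ===== SOURCE B (Python) =====
-- def merge_ix_list(ix_list):
--     # Selection-style recursion: repeatedly extract the smallest key, emit the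
--     # value of its first occurrence, and recurse on the entries with other keys.
--     if not ix_list:
--         return []
--     k = min(X[0] for X in ix_list)
--     v = next(X[1] for X in ix_list if X[0] == k)
--     return list(v) + merge_ix_list([X for X in ix_list if X[0] != k])
-- ===== Notes on version B (the rewrite author's own statement) =====
-- stated objective: alternative
-- what changed: Replaces A's seen-set dedup pass + library sort + flatten loop with a selection-by-minimum recursion: extract the smallest key, emit the value of its first occurrence, and recurse on the entries with other keys (no sort, no set).
import Mathlib
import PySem

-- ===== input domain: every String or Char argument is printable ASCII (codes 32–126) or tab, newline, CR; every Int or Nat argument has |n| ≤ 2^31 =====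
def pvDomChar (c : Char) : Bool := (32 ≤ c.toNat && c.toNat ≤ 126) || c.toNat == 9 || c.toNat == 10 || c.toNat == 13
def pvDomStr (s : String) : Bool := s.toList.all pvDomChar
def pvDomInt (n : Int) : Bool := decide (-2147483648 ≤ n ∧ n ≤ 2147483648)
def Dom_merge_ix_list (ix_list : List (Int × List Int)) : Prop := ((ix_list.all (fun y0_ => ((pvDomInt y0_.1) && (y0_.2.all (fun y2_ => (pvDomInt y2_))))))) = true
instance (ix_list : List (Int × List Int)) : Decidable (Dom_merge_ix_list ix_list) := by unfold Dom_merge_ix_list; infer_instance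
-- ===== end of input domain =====

-- B replaces A's seen-set dedup pass + library sort + flatten loop with a selection-by-minimum
-- recursion (extract the smallest key, emit its first occurrence's value, recurse on the rest);
-- same result, a different algorithm with no sort and no set.

-- ===== PORT A =====
def merge_ix_list (ix_list : List (Int × List Int)) : List Int :=
  -- L, seen built by the first loop
  let Ls := ix_list.foldl
    (fun (acc : List (Int × List Int) × PySem.Set Int) X =>
      if PySem.Set.contains acc.2 X.1 then acc
      else (acc.1 ++ [X], PySem.Set.add acc.2 X.1))
    ([], PySem.Set.empty)
  -- betw = [X[1] for X in sorted(L, key=lambda X: X[0])]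
  let betw := (PySem.List.sorted Ls.1 (fun X => X.1)).map (fun X => X.2)
  -- o built by the second loop (o.extend(b))
  betw.foldl (fun o b => o ++ b) []

-- ===== PORT B =====
-- min(X[0] for X in ix_list) on the nonempty list x :: rest
def pvMinKey (x : Int × List Int) (rest : List (Int × List Int)) : Int :=
  (rest.map (fun X => X.1)).foldl min x.1

-- pvMinKey is Python's min over the keys: the first extremal element of the key list
theorem pvMinKey_min? (x : Int × List Int) (rest : List (Int × List Int)) :
    PySem.List.min? ((x :: rest).map (fun X => X.1)) (fun y : Int => y)
      = some (pvMinKey x rest) := by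
  simp only [pvMinKey]; rw [List.map_cons]
  exact PySem.List.min?_id_cons x.1 (rest.map (fun X => X.1))

-- termination fact the port cites: removing every entry carrying the minimal key shrinks the list
theorem pv_filter_min_len_lt (x : Int × List Int) (rest : List (Int × List Int)) :
    ((x :: rest).filter (fun X => X.1 != pvMinKey x rest)).length
      < (x :: rest).length := by
  have hmem := PySem.List.min?_mem (pvMinKey_min? x rest)
  rcases List.mem_map.mp hmem with ⟨y, hy, hyk⟩
  have hsplit := List.length_eq_length_filter_add
    (l := x :: rest) (fun X : Int × List Int => X.1 != pvMinKey x rest)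
  have hpos : 0 < ((x :: rest).filter (fun X => !(X.1 != pvMinKey x rest))).length := by
    have : y ∈ (x :: rest).filter (fun X => !(X.1 != pvMinKey x rest)) :=
      List.mem_filter.mpr ⟨hy, by simp [hyk]⟩
    exact List.length_pos_of_mem this
  omega

def merge_ix_list_alt (ix_list : List (Int × List Int)) : List Int :=
  match ix_list with
  | [] => []
  | x :: rest =>
      -- k = min(X[0] for X in ix_list)
      let k := pvMinKey x rest
      -- v = next(X[1] for X in ix_list if X[0] == k); the match always succeeds since k is attained
      let v := (((x :: rest).find? (fun X => X.1 == k)).map (fun X => X.2)).getD []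
      -- list(v) + merge_ix_list([X for X in ix_list if X[0] != k])
      v ++ merge_ix_list_alt ((x :: rest).filter (fun X => X.1 != k))
  termination_by ix_list.length
  decreasing_by exact pv_filter_min_len_lt x rest

-- ===== PRECONDITION & SPEC =====
def Spec_merge_ix_list (ix_list : List (Int × List Int)) (out : List Int) : Prop := out = merge_ix_list_alt ix_list
instance (ix_list : List (Int × List Int)) (out : List Int) : Decidable (Spec_merge_ix_list ix_list out) := by unfold Spec_merge_ix_list; infer_instance

-- ===== CLAIM (what is proved, stated in full; the proofs are below) =====
def Claim_equal_merge_ix_list : Prop := ∀ (ix_list : List (Int × List Int)), Dom_merge_ix_list ix_list → Spec_merge_ix_list ix_list (merge_ix_list ix_list)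

-- ===== LEMMAS AND PROOFS =====

-- "dedup by key, keep the first occurrence" — the skeleton of A's first loop
def dkey : List (Int × List Int) → PySem.Set Int → List (Int × List Int)
  | [], _ => []
  | x :: xs, s =>
      if PySem.Set.contains s x.1 then dkey xs s
      else x :: dkey xs (PySem.Set.add s x.1)

theorem dkey_nil (s : PySem.Set Int) : dkey [] s = [] := rfl

theorem dkey_cons (x : Int × List Int) (xs : List (Int × List Int)) (s : PySem.Set Int) :
    dkey (x :: xs) s =
      if PySem.Set.contains s x.1 then dkey xs s
      else x :: dkey xs (PySem.Set.add s x.1) := rfl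

theorem not_mem_of_not_contains (s : PySem.Set Int) (k : Int)
    (h : ¬ PySem.Set.contains s k = true) : k ∉ s := by
  simpa [PySem.Set.contains, List.contains_iff_mem] using h

theorem mem_of_contains (s : PySem.Set Int) (k : Int)
    (h : PySem.Set.contains s k = true) : k ∈ s := by
  simpa [PySem.Set.contains, List.contains_iff_mem] using h

theorem foldl_A (xs : List (Int × List Int)) (L : List (Int × List Int)) (s : PySem.Set Int) :
    (xs.foldl
      (fun (acc : List (Int × List Int) × PySem.Set Int) X =>
        if PySem.Set.contains acc.2 X.1 then acc
        else (acc.1 ++ [X], PySem.Set.add acc.2 X.1)) (L, s)).1 = L ++ dkey xs s := by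
  induction xs generalizing L s with
  | nil => simp [dkey_nil]
  | cons x xs ih =>
      rw [List.foldl_cons, dkey_cons]
      by_cases h : PySem.Set.contains s x.1
      · rw [if_pos h, if_pos h, ih]
      · rw [if_neg h, if_neg h, ih]
        simp

theorem mem_dkey (xs : List (Int × List Int)) (s : PySem.Set Int) (z : Int × List Int) :
    z ∈ dkey xs s ↔ z.1 ∉ s ∧ xs.find? (fun y => y.1 == z.1) = some z := by
  induction xs generalizing s with
  | nil => simp [dkey_nil]
  | cons x xs ih =>
      rw [dkey_cons]
      by_cases hk : x.1 = z.1
      · by_cases hs : PySem.Set.contains s x.1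
        · have hz : z.1 ∈ s := hk ▸ mem_of_contains s x.1 hs
          rw [if_pos hs, List.find?_cons_of_pos (by simpa using hk)]
          constructor
          · intro hmem
            exact absurd ((ih s).mp hmem).1 (by simp [hz])
          · rintro ⟨h1, _⟩; exact absurd hz h1
        · have hns : z.1 ∉ s := hk ▸ not_mem_of_not_contains s x.1 hs
          rw [if_neg hs, List.find?_cons_of_pos (by simpa using hk), List.mem_cons]
          constructor
          · rintro (rfl | hmem)
            · exact ⟨hns, rfl⟩
            · have := (ih _).mp hmem
              exact absurd (by simp [PySem.Set.mem_add, hk]) this.1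
          · rintro ⟨_, hz⟩
            exact Or.inl (by injection hz with h; exact h.symm)
      · have hfind : (x :: xs).find? (fun y => y.1 == z.1) = xs.find? (fun y => y.1 == z.1) := by
          rw [List.find?_cons_of_neg (by simpa using hk)]
        by_cases hs : PySem.Set.contains s x.1
        · rw [if_pos hs, hfind]; exact ih s
        · rw [if_neg hs, hfind, List.mem_cons]
          constructor
          · rintro (rfl | hmem)
            · exact absurd rfl hk
            · have := (ih _).mp hmem
              refine ⟨fun h => this.1 ?_, this.2⟩
              simp [PySem.Set.mem_add, h]
          · rintro ⟨h1, h2⟩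
            refine Or.inr ((ih _).mpr ⟨?_, h2⟩)
            rw [PySem.Set.mem_add]
            rintro (h | h)
            · exact h1 h
            · exact hk h.symm

theorem mem_dkey_sub (xs : List (Int × List Int)) (s : PySem.Set Int) (z : Int × List Int)
    (h : z ∈ dkey xs s) : z ∈ xs ∧ z.1 ∉ s := by
  have := (mem_dkey xs s z).mp h
  exact ⟨List.mem_of_find?_eq_some this.2, this.1⟩

theorem dkey_pairwise_lt (xs : List (Int × List Int))
    (hp : xs.Pairwise (fun a b => a.1 ≤ b.1)) (s : PySem.Set Int) :
    (dkey xs s).Pairwise (fun a b => a.1 < b.1) := by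
  induction xs generalizing s with
  | nil => simp [dkey_nil]
  | cons x xs ih =>
      rcases List.pairwise_cons.mp hp with ⟨hx, htail⟩
      rw [dkey_cons]
      by_cases hs : PySem.Set.contains s x.1
      · rw [if_pos hs]; exact ih htail s
      · rw [if_neg hs, List.pairwise_cons]
        refine ⟨?_, ih htail _⟩
        intro z hz
        rcases mem_dkey_sub _ _ _ hz with ⟨hzx, hzs⟩
        have hle := hx z hzx
        have hne : z.1 ≠ x.1 := fun h => hzs (by simp [PySem.Set.mem_add, h])
        omega

theorem insertBy_nil (before : (Int × List Int) → (Int × List Int) → Bool) (x : Int × List Int) :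
    PySem.List.insertBy before x [] = [x] := rfl

theorem insertBy_cons (before : (Int × List Int) → (Int × List Int) → Bool)
    (x y : Int × List Int) (ys : List (Int × List Int)) :
    PySem.List.insertBy before x (y :: ys)
      = if before x y then x :: y :: ys else y :: PySem.List.insertBy before x ys := rfl

theorem find?_insertBy_of_neg (p : Int × List Int → Bool)
    (before : (Int × List Int) → (Int × List Int) → Bool)
    (x : Int × List Int) (ys : List (Int × List Int)) (hx : p x = false) :
    (PySem.List.insertBy before x ys).find? p = ys.find? p := by
  induction ys with
  | nil => simp [insertBy_nil, hx]
  | cons y ys ih =>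
      rw [insertBy_cons]
      by_cases hb : before x y
      · rw [if_pos hb, List.find?_cons_of_neg (by simp [hx])]
      · rw [if_neg hb]
        cases hpy : p y
        · rw [List.find?_cons_of_neg (by simp [hpy]), List.find?_cons_of_neg (by simp [hpy]), ih]
        · rw [List.find?_cons_of_pos hpy, List.find?_cons_of_pos hpy]

theorem find?_insertBy_self (x : Int × List Int) (ys : List (Int × List Int))
    (hp : ys.Pairwise (fun a b => a.1 ≤ b.1)) :
    (PySem.List.insertBy (fun a b => decide (a.1 < b.1)) x ys).find? (fun y => y.1 == x.1)
      = some ((ys.find? (fun y => y.1 == x.1)).getD x) := by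
  induction ys with
  | nil => simp [insertBy_nil]
  | cons y ys ih =>
      rcases List.pairwise_cons.mp hp with ⟨hy, htail⟩
      rw [insertBy_cons]
      by_cases hb : x.1 < y.1
      · have hnone : ys.find? (fun z => z.1 == x.1) = none := by
          apply List.find?_eq_none.mpr
          intro z hz
          have := hy z hz
          simp only [beq_iff_eq]
          omega
        rw [if_pos (by simpa using hb), List.find?_cons_of_pos (by simp),
          List.find?_cons_of_neg (by simp; omega), hnone]
        simp
      · rw [if_neg (by simpa using hb)]
        by_cases hk : y.1 = x.1
        · rw [List.find?_cons_of_pos (by simpa using hk),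
            List.find?_cons_of_pos (by simpa using hk)]
          simp
        · rw [List.find?_cons_of_neg (by simpa using hk),
            List.find?_cons_of_neg (by simpa using hk)]
          exact ih htail

theorem find?_sorted (xs : List (Int × List Int)) (k : Int) :
    (PySem.List.sorted xs (fun X => X.1)).find? (fun y => y.1 == k)
      = xs.find? (fun y => y.1 == k) := by
  induction xs using List.reverseRecOn with
  | nil => simp [PySem.List.sorted_eq_foldl_insertBy]
  | append_singleton ys x ih =>
      have hstep : PySem.List.sorted (ys ++ [x]) (fun X => X.1)
          = PySem.List.insertBy (fun a b => decide (a.1 < b.1)) x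
              (PySem.List.sorted ys (fun X => X.1)) := by
        rw [PySem.List.sorted_eq_foldl_insertBy, PySem.List.sorted_eq_foldl_insertBy,
          List.foldl_append]
        simp
      rw [hstep]
      by_cases hx : x.1 = k
      · subst hx
        rw [find?_insertBy_self x _ (PySem.List.sorted_pairwise ys (fun X => X.1)), ih]
        rw [List.find?_append]
        cases h : ys.find? (fun y => y.1 == x.1) <;> simp
      · rw [find?_insertBy_of_neg _ _ _ _ (by simpa using hx), ih, List.find?_append]
        cases h : ys.find? (fun y => y.1 == k) <;>
          simp [show (x.1 == k) = false by simpa using hx]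

-- membership in A's dedup-of-sorted list, phrased on the raw input
theorem mem_dkey_sorted_empty (xs : List (Int × List Int)) (z : Int × List Int) :
    z ∈ dkey (PySem.List.sorted xs (fun X => X.1)) PySem.Set.empty
      ↔ xs.find? (fun y => y.1 == z.1) = some z := by
  rw [mem_dkey, find?_sorted]
  simp

-- two strictly key-increasing lists with the same members are equal
theorem eq_of_pairwise_lt_ext (l1 l2 : List (Int × List Int))
    (h1 : l1.Pairwise (fun a b => a.1 < b.1)) (h2 : l2.Pairwise (fun a b => a.1 < b.1))
    (hm : ∀ z, z ∈ l1 ↔ z ∈ l2) : l1 = l2 := by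
  induction l1 generalizing l2 with
  | nil =>
      cases l2 with
      | nil => rfl
      | cons b t2 => simpa using (hm b).mpr (by simp)
  | cons a t ih =>
      cases l2 with
      | nil => simpa using (hm a).mp (by simp)
      | cons b t2 =>
          rcases List.pairwise_cons.mp h1 with ⟨ha1, ht1⟩
          rcases List.pairwise_cons.mp h2 with ⟨hb2, ht2⟩
          have hab : a = b := by
            rcases List.mem_cons.mp ((hm a).mp (by simp)) with h | h
            · exact h
            · rcases List.mem_cons.mp ((hm b).mpr (by simp)) with h' | h'
              · exact h'.symm
              · have := hb2 a h
                have := ha1 b h'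
                omega
          subst hab
          have htail : ∀ z, z ∈ t ↔ z ∈ t2 := by
            intro z
            constructor
            · intro hz
              rcases List.mem_cons.mp ((hm z).mp (List.mem_cons_of_mem a hz)) with h | h
              · subst h; exact absurd (ha1 z hz) (by omega)
              · exact h
            · intro hz
              rcases List.mem_cons.mp ((hm z).mpr (List.mem_cons_of_mem a hz)) with h | h
              · subst h; exact absurd (hb2 z hz) (by omega)
              · exact h
          exact congrArg (a :: ·) (ih t2 ht1 ht2 htail)

-- filtering away key k does not disturb the first occurrence of any other key
theorem find?_filter_ne (xs : List (Int × List Int)) (c k : Int) (hck : c ≠ k) :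
    ((xs.filter (fun X => X.1 != k)).find? (fun X => X.1 == c))
      = xs.find? (fun X => X.1 == c) := by
  induction xs with
  | nil => simp
  | cons x xs ih =>
      by_cases hxk : x.1 = k
      · rw [List.filter_cons_of_neg (by simp [hxk]),
          List.find?_cons_of_neg (by simp [hxk, hck.symm]), ih]
      · rw [List.filter_cons_of_pos (by simp [hxk])]
        by_cases hxc : x.1 = c
        · rw [List.find?_cons_of_pos (by simpa using hxc),
            List.find?_cons_of_pos (by simpa using hxc)]
        · rw [List.find?_cons_of_neg (by simpa using hxc),
            List.find?_cons_of_neg (by simpa using hxc), ih]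

theorem find?_filter_self (xs : List (Int × List Int)) (k : Int) :
    ((xs.filter (fun X => X.1 != k)).find? (fun X => X.1 == k)) = none := by
  apply List.find?_eq_none.mpr
  intro z hz
  have := (List.mem_filter.mp hz).2
  simpa using this

theorem pvMinKey_isMin (x : Int × List Int) (rest : List (Int × List Int)) :
    ∀ y ∈ x :: rest, pvMinKey x rest ≤ y.1 := by
  intro y hy
  exact PySem.List.min?_isMin (pvMinKey_min? x rest) y.1
    (List.mem_map.mpr ⟨y, hy, rfl⟩)

-- one selection step: A's sorted dedup list starts with the first occurrence of the minimal key
theorem dkey_sorted_step (x : Int × List Int) (rest : List (Int × List Int))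
    (y : Int × List Int)
    (hfind : (x :: rest).find? (fun X => X.1 == pvMinKey x rest) = some y) :
    dkey (PySem.List.sorted (x :: rest) (fun X => X.1)) PySem.Set.empty
      = y :: dkey (PySem.List.sorted ((x :: rest).filter (fun X => X.1 != pvMinKey x rest))
            (fun X => X.1)) PySem.Set.empty := by
  have hyk : y.1 = pvMinKey x rest := by
    simpa using List.find?_some hfind
  have htail_gt : ∀ z ∈ dkey (PySem.List.sorted ((x :: rest).filter
      (fun X => X.1 != pvMinKey x rest)) (fun X => X.1)) PySem.Set.empty,
      pvMinKey x rest < z.1 := by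
    intro z hz
    have hf := (mem_dkey_sorted_empty _ z).mp hz
    have hzf := List.mem_of_find?_eq_some hf
    have hzne : z.1 ≠ pvMinKey x rest := by
      have := (List.mem_filter.mp hzf).2
      simpa using this
    have hzmem := (List.mem_filter.mp hzf).1
    have := pvMinKey_isMin x rest z hzmem
    omega
  apply eq_of_pairwise_lt_ext
  · exact dkey_pairwise_lt _ (PySem.List.sorted_pairwise (x :: rest) (fun X => X.1)) _
  · rw [List.pairwise_cons]
    refine ⟨fun z hz => ?_, dkey_pairwise_lt _
      (PySem.List.sorted_pairwise ((x :: rest).filter (fun X => X.1 != pvMinKey x rest))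
        (fun X => X.1)) _⟩
    rw [hyk]
    exact htail_gt z hz
  · intro z
    rw [mem_dkey_sorted_empty, List.mem_cons, mem_dkey_sorted_empty]
    by_cases hzk : z.1 = pvMinKey x rest
    · rw [hzk, hfind, find?_filter_self]
      constructor
      · rintro h; exact Or.inl (by injection h with h; exact h.symm)
      · rintro (rfl | h)
        · rfl
        · exact absurd h (by simp)
    · rw [find?_filter_ne _ _ _ hzk]
      constructor
      · intro h
        exact Or.inr h
      · rintro (rfl | h)
        · exact absurd hyk hzk
        · exact h
  
theorem dkey_keys_nodup (xs : List (Int × List Int)) (s : PySem.Set Int) :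
    ((dkey xs s).map (fun X => X.1)).Nodup := by
  induction xs generalizing s with
  | nil => simp [dkey_nil]
  | cons x xs ih =>
      rw [dkey_cons]
      by_cases hs : PySem.Set.contains s x.1
      · rw [if_pos hs]; exact ih s
      · rw [if_neg hs, List.map_cons, List.nodup_cons]
        refine ⟨?_, ih _⟩
        intro hmem
        rcases List.mem_map.mp hmem with ⟨z, hz, hzk⟩
        have := (mem_dkey_sub _ _ _ hz).2
        exact this (by simp [PySem.Set.mem_add, hzk])

theorem dkey_nodup (xs : List (Int × List Int)) (s : PySem.Set Int) : (dkey xs s).Nodup :=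
  (dkey_keys_nodup xs s).of_map

-- A's "sort after dedup" equals "dedup after sort"
theorem sorted_dkey (xs : List (Int × List Int)) :
    PySem.List.sorted (dkey xs PySem.Set.empty) (fun X => X.1)
      = dkey (PySem.List.sorted xs (fun X => X.1)) PySem.Set.empty := by
  apply PySem.List.sorted_eq_of_perm_of_pairwise_lt
  · rw [List.perm_ext_iff_of_nodup (dkey_nodup _ _) (dkey_nodup _ _)]
    intro z
    rw [mem_dkey_sorted_empty, mem_dkey]
    simp
  · exact dkey_pairwise_lt _
      (PySem.List.sorted_pairwise xs (fun X => X.1)) PySem.Set.empty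

-- B's recursion computes exactly "flatten the values of A's sorted dedup list"
theorem alt_eq_flat : ∀ (n : Nat) (xs : List (Int × List Int)), xs.length ≤ n →
    merge_ix_list_alt xs
      = (dkey (PySem.List.sorted xs (fun X => X.1)) PySem.Set.empty).flatMap
          (fun X => X.2) := by
  intro n
  induction n with
  | zero =>
      intro xs h
      have : xs = [] := List.eq_nil_of_length_eq_zero (Nat.le_zero.mp h)
      subst this
      simp [merge_ix_list_alt, PySem.List.sorted, dkey_nil]
  | succ n ih =>
      intro xs h
      match xs with
      | [] => simp [merge_ix_list_alt, PySem.List.sorted, dkey_nil]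
      | x :: rest =>
          have hmem := PySem.List.min?_mem (pvMinKey_min? x rest)
          rcases List.mem_map.mp hmem with ⟨w, hw, hwk⟩
          have hfs : ((x :: rest).find? (fun X => X.1 == pvMinKey x rest)).isSome := by
            rw [List.find?_isSome]
            exact ⟨w, hw, by simpa using hwk⟩
          rcases Option.isSome_iff_exists.mp hfs with ⟨y, hfind⟩
          have hlen : ((x :: rest).filter (fun X => X.1 != pvMinKey x rest)).length ≤ n := by
            have := pv_filter_min_len_lt x rest
            simp only [List.length_cons] at this h
            omega
          rw [merge_ix_list_alt]
          simp only [hfind, Option.map_some, Option.getD_some]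
          rw [ih _ hlen, dkey_sorted_step x rest y hfind, List.flatMap_cons]

-- ===== VERDICT (by name: the statement is the Claim_ definition above) =====
theorem merge_ix_list_spec : Claim_equal_merge_ix_list := by
  intro ix_list _
  unfold Spec_merge_ix_list merge_ix_list
  dsimp only []
  rw [foldl_A]
  simp only [List.nil_append]
  rw [PySem.List.foldl_append_eq_flatMap (fun b => b)]
  rw [alt_eq_flat ix_list.length ix_list le_rfl]
  simp only [List.flatMap_def]
  rw [show ([] : PySem.Set Int) = PySem.Set.empty from rfl, sorted_dkey]
  simp [Function.comp_def]
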